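-- pv_equiv track=rewrite | github.com/forrestzhang/bagatelle | bagatelle/peakanno.py | labelfilter
-- ===== SOURCE A (Python) =====
-- def labelfilter(x):
--     x.difference_update('.')
--     label = 'error'
--
--     if 'other' in list(x):
--
--         label = 'other'
--
--     elif 'three_prime_UTR' in list(x):
--
--         label = "3'UTR"
--
--     elif 'five_prime_UTR' in list(x):
--
--         label = "5'UTR"
--
--     elif 'CDS' in list(x):
--
--         label = 'CDS'
--
--     elif 'intron' in list(x):
--
--         label = 'intron'
--     #
--     # elif 'TSS_1000' in list(x):
--     #
--     #     label = 'TSS_1000'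
--     #
--     # elif 'TSS_3000' in list(x):
--     #
--     #     label = 'TSS_3000'
--
--     else:
--
--         tmplab = []
--
--         for i in list(x):
--
--             tmplab.append(i)
--
--         label = ','.join(sorted(tmplab))
--
--     return label
-- ===== SOURCE B (Python) =====
-- RANK = {'other': (0, 'other'),
--         'three_prime_UTR': (1, "3'UTR"),
--         'five_prime_UTR': (2, "5'UTR"),
--         'CDS': (3, 'CDS'),
--         'intron': (4, 'intron')}
--
-- def labelfilter(x):
--     x.difference_update('.')
--     best = None
--     for e in x:
--         r = RANK.get(e)
--         if r is not None and (best is None or r[0] < best[0]):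
--             best = r
--     if best is not None:
--         return best[1]
--     return ','.join(sorted(x))
-- ===== Notes on version B (the rewrite author's own statement) =====
-- stated objective: alternative
-- what changed: Instead of testing each priority key for membership in the set (a cascade of key-side lookups), B scans the set's elements once, ranking each via a key->(rank,label) table and keeping the minimum-rank hit; only if no element is a known feature does it join the sorted set.
import Mathlib
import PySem

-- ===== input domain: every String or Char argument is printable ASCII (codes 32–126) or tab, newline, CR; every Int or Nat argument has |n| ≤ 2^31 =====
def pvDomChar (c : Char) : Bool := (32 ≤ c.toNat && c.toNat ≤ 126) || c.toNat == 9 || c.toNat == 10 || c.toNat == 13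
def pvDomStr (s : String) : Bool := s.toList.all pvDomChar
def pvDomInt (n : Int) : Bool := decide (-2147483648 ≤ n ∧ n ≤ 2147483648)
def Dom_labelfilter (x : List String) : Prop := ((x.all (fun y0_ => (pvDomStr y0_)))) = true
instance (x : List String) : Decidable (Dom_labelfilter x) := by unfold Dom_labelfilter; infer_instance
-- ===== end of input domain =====

-- B replaces A's key-side membership cascade by a single element-side scan keeping the minimum-rank
-- recognized feature (objective: alternative; its result is independent of the set's iteration order
-- because the rank table assigns distinct ranks and a fixed label per key).
-- A mutates its set argument in place (difference_update); the equivalence proved here is about the RETURN value only.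

-- ===== PORT A =====
def labelfilter (x : List String) : String :=
  -- x.difference_update('.')  (removes the element "." — iterating the string '.' yields that one character)
  let x1 : PySem.Set String := PySem.Set.diff x ["."]
  -- label = 'error' is always overwritten before return
  if x1.contains "other" then "other"
  else if x1.contains "three_prime_UTR" then "3'UTR"
  else if x1.contains "five_prime_UTR" then "5'UTR"
  else if x1.contains "CDS" then "CDS"
  else if x1.contains "intron" then "intron"
  else
    -- tmplab = []; for i in list(x): tmplab.append(i)   (sorted afterwards, so set order cannot matter)
    let tmplab : List String := x1.foldl (fun acc i => acc ++ [i]) []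
    PySem.Str.join "," (PySem.List.sorted tmplab (fun s => s) false)

-- ===== PORT B =====
def pvRANK : PySem.Dict String (Int × String) :=
  PySem.Dict.mk  -- dict literal with distinct keys
    [("other", (0, "other")), ("three_prime_UTR", (1, "3'UTR")),
     ("five_prime_UTR", (2, "5'UTR")), ("CDS", (3, "CDS")), ("intron", (4, "intron"))]

-- the loop body: `r = RANK.get(e); if r is not None and (best is None or r[0] < best[0]): best = r`
def pvStep (best : Option (Int × String)) (e : String) : Option (Int × String) :=
  match PySem.Dict.get? pvRANK e with
  | none => best
  | some r =>
    match best with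
    | none => some r
    | some b => if r.1 < b.1 then some r else best

def labelfilter_alt (x : List String) : String :=
  let s : PySem.Set String := PySem.Set.diff x ["."]
  let best := s.foldl pvStep none
  match best with
  | some b => b.2
  | none => PySem.Str.join "," (PySem.List.sorted s (fun s => s) false)

-- ===== PRECONDITION & SPEC =====
def Spec_labelfilter (x : List String) (out : String) : Prop := out = labelfilter_alt x
instance (x : List String) (out : String) : Decidable (Spec_labelfilter x out) := by unfold Spec_labelfilter; infer_instance

-- ===== CLAIM (what is proved, stated in full; the proofs are below) =====
def Claim_equal_labelfilter : Prop := ∀ (x : List String), Dom_labelfilter x → Spec_labelfilter x (labelfilter x)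

-- ===== LEMMAS AND PROOFS =====

-- left-biased minimum on optional (rank, label) pairs; pvStep best e = pvMinO best (RANK.get e)
def pvMinO (a b : Option (Int × String)) : Option (Int × String) :=
  match b with
  | none => a
  | some r =>
    match a with
    | none => some r
    | some x => if r.1 < x.1 then some r else some x

lemma pvStep_eq_minO (a : Option (Int × String)) (e : String) :
    pvStep a e = pvMinO a (PySem.Dict.get? pvRANK e) := by
  unfold pvStep pvMinO
  cases PySem.Dict.get? pvRANK e with
  | none => rfl
  | some r => cases a <;> simp

lemma pvMinO_assoc (a b c : Option (Int × String)) :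
    pvMinO (pvMinO a b) c = pvMinO a (pvMinO b c) := by
  rcases a with _ | x <;> rcases b with _ | y <;> rcases c with _ | z <;>
    simp only [pvMinO]
  all_goals first
  | rfl
  | (by_cases h1 : y.1 < x.1 <;> by_cases h2 : z.1 < y.1 <;> by_cases h3 : z.1 < x.1 <;>
      simp [h1, h2, h3] <;> omega)
  | (by_cases h2 : z.1 < y.1 <;> simp [h2])

lemma pv_foldl_shift (l : List String) (a : Option (Int × String)) :
    l.foldl pvStep a = pvMinO a (l.foldl pvStep none) := by
  induction l generalizing a with
  | nil => rfl
  | cons h t ih =>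
    simp only [List.foldl_cons]
    rw [ih (pvStep a h), ih (pvStep none h), pvStep_eq_minO a h, pvStep_eq_minO none h]
    have : pvMinO none (PySem.Dict.get? pvRANK h) = PySem.Dict.get? pvRANK h := by
      cases PySem.Dict.get? pvRANK h <;> rfl
    rw [this, pvMinO_assoc]

-- the cascade characterization of the fold's result
def pvCasc (l : List String) : Option (Int × String) :=
  if "other" ∈ l then some (0, "other")
  else if "three_prime_UTR" ∈ l then some (1, "3'UTR")
  else if "five_prime_UTR" ∈ l then some (2, "5'UTR")
  else if "CDS" ∈ l then some (3, "CDS")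
  else if "intron" ∈ l then some (4, "intron")
  else none

lemma pv_fold_eq_casc (l : List String) : l.foldl pvStep none = pvCasc l := by
  induction l with
  | nil => rfl
  | cons h t ih =>
    rw [List.foldl_cons, pv_foldl_shift, ih, pvStep_eq_minO]
    have hmin : ∀ b, pvMinO none b = b := by intro b; cases b <;> rfl
    rw [hmin]
    by_cases h1 : h = "other"
    · subst h1
      have hg : PySem.Dict.get? pvRANK "other" = some (0, "other") := by decide
      rw [hg]
      unfold pvCasc
      simp only [List.mem_cons, String.reduceEq, false_or, true_or, if_true]
      split_ifs <;> decide
    · by_cases h2 : h = "three_prime_UTR"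
      · subst h2
        have hg : PySem.Dict.get? pvRANK "three_prime_UTR" = some (1, "3'UTR") := by decide
        rw [hg]
        unfold pvCasc
        simp only [List.mem_cons, String.reduceEq, false_or, true_or, if_true]
        split_ifs <;> decide
      · by_cases h3 : h = "five_prime_UTR"
        · subst h3
          have hg : PySem.Dict.get? pvRANK "five_prime_UTR" = some (2, "5'UTR") := by decide
          rw [hg]
          unfold pvCasc
          simp only [List.mem_cons, String.reduceEq, false_or, true_or, if_true]
          split_ifs <;> decide
        · by_cases h4 : h = "CDS"
          · subst h4
            have hg : PySem.Dict.get? pvRANK "CDS" = some (3, "CDS") := by decide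
            rw [hg]
            unfold pvCasc
            simp only [List.mem_cons, String.reduceEq, false_or, true_or, if_true]
            split_ifs <;> decide
          · by_cases h5 : h = "intron"
            · subst h5
              have hg : PySem.Dict.get? pvRANK "intron" = some (4, "intron") := by decide
              rw [hg]
              unfold pvCasc
              simp only [List.mem_cons, String.reduceEq, false_or, true_or, if_true]
              split_ifs <;> decide
            · have h1' : ¬("other" = h) := fun e => h1 e.symm
              have h2' : ¬("three_prime_UTR" = h) := fun e => h2 e.symm
              have h3' : ¬("five_prime_UTR" = h) := fun e => h3 e.symm
              have h4' : ¬("CDS" = h) := fun e => h4 e.symm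
              have h5' : ¬("intron" = h) := fun e => h5 e.symm
              have hget : PySem.Dict.get? pvRANK h = none := by
                simp only [pvRANK, PySem.Dict.get?_mk_cons, beq_iff_eq]
                rw [if_neg h1', if_neg h2', if_neg h3', if_neg h4', if_neg h5']
                rfl
              rw [hget, hmin]
              unfold pvCasc
              simp only [List.mem_cons, h1', h2', h3', h4', h5', false_or]

lemma pv_foldl_append (l acc : List String) :
    l.foldl (fun acc i => acc ++ [i]) acc = acc ++ l := by
  induction l generalizing acc with
  | nil => simp
  | cons h t ih => simp [List.foldl, ih]

-- ===== VERDICT (by name: the statement is the Claim_ definition above) =====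
theorem labelfilter_spec : Claim_equal_labelfilter := by
  intro x _
  unfold Spec_labelfilter labelfilter labelfilter_alt
  simp only [pv_fold_eq_casc, pv_foldl_append, List.nil_append]
  set s := PySem.Set.diff x ["."] with hs
  unfold pvCasc
  by_cases c1 : "other" ∈ s <;> by_cases c2 : "three_prime_UTR" ∈ s <;>
    by_cases c3 : "five_prime_UTR" ∈ s <;> by_cases c4 : "CDS" ∈ s <;>
    by_cases c5 : "intron" ∈ s <;>
    simp [c1, c2, c3, c4, c5]
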